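-- pv_equiv track=rewrite | github.com/datawhalechina/huawei-od-python | codes/questions200/259_min-number-of-uniform-weight-limit.py | get_min_weight
-- ===== SOURCE A (Python) =====
-- def get_min_weight(goods, k):
--     min_weight = max(goods)
--     max_weight = sum(goods)
--     while min_weight < max_weight:
--         mid = (min_weight + max_weight) // 2
--         if check(goods, mid, [0] * k, 0):
--             max_weight = mid
--         else:
--             min_weight = mid + 1
--     return min_weight
--
-- def check(goods, weight, vans, index):
--     # 判断所有货物是否都装完了
--     if index == len(goods):
--         return True
--     for i in range(len(vans)):
--         if vans[i] + goods[index] <= weight: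
--             vans[i] += goods[index]
--             if check(goods, weight, vans, index + 1):
--                 return True
--             vans[i] -= goods[index]
--     return False
-- ===== SOURCE B (Python) =====
-- def get_min_weight(goods, k):
--     lo = max(goods)
--     hi = sum(goods)
--     return _search(goods, k, lo, hi)
--
--
-- def _search(goods, k, lo, hi):
--     if lo >= hi:
--         return lo
--     mid = (lo + hi) // 2
--     if _feas(goods, mid, k):
--         return _search(goods, k, lo, mid)
--     return _search(goods, k, mid + 1, hi)
--
--
-- def _feas(items, w, k):
--     # can items (kept in order) be split among k vans, every van keeping
--     # each of its running load sums <= w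
--     if not items:
--         return True
--     if k <= 0:
--         return False
--     return _first_van(items, 0, [], w, k - 1)
--
--
-- def _first_van(items, load, rest, w, left):
--     # choose the current van's goods: each item either joins it (load grows)
--     # or is deferred (in order, collected in rest) to the `left` other vans
--     if not items:
--         return _feas(rest, w, left)
--     g, tail = items[0], items[1:]
--     if load + g <= w and _first_van(tail, load + g, rest, w, left):
--         return True
--     return _first_van(tail, load, rest + [g], w, left)
-- ===== Notes on version B (the rewrite author's own statement) =====
-- stated objective: alternative
-- what changed: keeps the binary search on the answer but replaces A's item-by-item backtracking over a mutable array of k van loads by a van-by-van decomposition: each feasibility test picks the current van's goods as a subsequence of the remaining items (running load kept <= mid) and recurses on the deferred items with one van fewer, over immutable lists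
import Mathlib
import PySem

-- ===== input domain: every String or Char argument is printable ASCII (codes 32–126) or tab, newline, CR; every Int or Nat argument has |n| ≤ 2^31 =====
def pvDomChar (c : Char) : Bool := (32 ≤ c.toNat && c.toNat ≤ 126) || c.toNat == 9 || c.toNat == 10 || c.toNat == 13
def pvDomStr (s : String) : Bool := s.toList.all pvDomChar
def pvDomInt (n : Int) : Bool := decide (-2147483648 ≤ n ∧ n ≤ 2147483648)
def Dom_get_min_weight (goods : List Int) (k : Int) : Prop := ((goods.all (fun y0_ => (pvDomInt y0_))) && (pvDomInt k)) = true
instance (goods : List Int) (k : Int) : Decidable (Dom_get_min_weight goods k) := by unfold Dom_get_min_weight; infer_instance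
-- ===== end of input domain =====

-- B keeps A's binary search on the answer but decides feasibility van-by-van
-- (choosing each van's goods as a subsequence, over immutable lists) instead of
-- A's item-by-item backtracking over a mutable load array; objective:
-- alternative (same exponential worst case, no speed claim). Return-value
-- equivalence (A mutates only a private scratch list, never an argument).

-- ===== PORT A =====
-- port of check(goods, weight, vans, index): the index into goods becomes the
-- remaining suffix `items`; the for-loop over van indices is checkTryA.
mutual
def checkA (w : Int) (vans : List Int) (items : List Int) : Bool :=
  match items with
  | [] => true                                   -- index == len(goods)
  | g :: rest => checkTryA w vans g rest 0
  termination_by (items.length, vans.length + 1, 0)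

def checkTryA (w : Int) (vans : List Int) (g : Int) (rest : List Int) (i : Nat) : Bool :=
  if _h : i < vans.length then
    (if vans.getD i 0 + g ≤ w then
      (if checkA w (vans.set i (vans.getD i 0 + g)) rest then true
       else checkTryA w vans g rest (i + 1))
     else checkTryA w vans g rest (i + 1))
  else false
  termination_by (rest.length + 1, vans.length - i, 1)
end

-- the while-loop of get_min_weight (min_weight = lo, max_weight = hi)
def bsA (goods : List Int) (k : Int) (lo hi : Int) : Int :=
  if h : lo < hi then
    let mid := PySem.Int.floordiv (lo + hi) 2
    if checkA mid (List.replicate k.toNat 0) goods then bsA goods k lo mid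
    else bsA goods k (mid + 1) hi
  else lo
  termination_by (hi - lo).toNat
  decreasing_by
  · obtain ⟨h1, h2⟩ := PySem.Int.floordiv_two_mid_bounds (lo := lo) (hi := hi) (le_of_lt h)
    have h3 : PySem.Int.floordiv (lo + hi) 2 < hi :=
      (PySem.Int.floordiv_lt_iff_lt_mul (by omega)).mpr (by omega)
    omega
  · obtain ⟨h1, h2⟩ := PySem.Int.floordiv_two_mid_bounds (lo := lo) (hi := hi) (le_of_lt h)
    omega

def get_min_weight (goods : List Int) (k : Int) : Int :=
  let min_weight := (PySem.List.max? goods (fun x => x)).getD 0   -- max(goods); Pre_ excludes []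
  let max_weight := goods.sum                                      -- sum(goods)
  bsA goods k min_weight max_weight

-- ===== PORT B =====
-- port of Source B: _feas / _first_van choose the current van's goods as a
-- subsequence (load grows) deferring the others to `rest` for the k-1 others.
mutual
def feasB (items : List Int) (w : Int) (k : Int) : Bool :=
  if items.isEmpty then true
  else if _h : k ≤ 0 then false
  else firstVanB items 0 [] w (k - 1)
  termination_by (k.toNat, 2 * items.length + 1)
  decreasing_by all_goals (simp only [Prod.lex_def, List.length_cons, List.length_nil, true_and, and_true]; omega)

def firstVanB : List Int → Int → List Int → Int → Int → Bool
  | [], _load, rest, w, left => feasB rest w left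
  | g :: tail, load, rest, w, left =>
    if (decide (load + g ≤ w) && firstVanB tail (load + g) rest w left) then true
    else firstVanB tail load (rest ++ [g]) w left
  termination_by items _load _rest _w left => (left.toNat + 1, 2 * items.length)
  decreasing_by all_goals (simp only [Prod.lex_def, List.length_cons, List.length_nil, true_and, and_true]; omega)
end

def searchB (goods : List Int) (k : Int) (lo hi : Int) : Int :=
  if h : lo ≥ hi then lo
  else
    let mid := PySem.Int.floordiv (lo + hi) 2
    if feasB goods mid k then searchB goods k lo mid
    else searchB goods k (mid + 1) hi
  termination_by (hi - lo).toNat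
  decreasing_by
  · obtain ⟨h1, h2⟩ := PySem.Int.floordiv_two_mid_bounds (lo := lo) (hi := hi) (by omega)
    have h3 : PySem.Int.floordiv (lo + hi) 2 < hi :=
      (PySem.Int.floordiv_lt_iff_lt_mul (by omega)).mpr (by omega)
    omega
  · obtain ⟨h1, h2⟩ := PySem.Int.floordiv_two_mid_bounds (lo := lo) (hi := hi) (by omega)
    omega

def get_min_weight_alt (goods : List Int) (k : Int) : Int :=
  let lo := (PySem.List.max? goods (fun x => x)).getD 0
  let hi := goods.sum
  searchB goods k lo hi

-- ===== PRECONDITION & SPEC =====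
-- Pre_ excludes only the empty goods list, on which Python A raises
-- ValueError from max(goods) (B raises identically there).
def Pre_get_min_weight (goods : List Int) (k : Int) : Prop := goods ≠ []
instance (goods : List Int) (k : Int) : Decidable (Pre_get_min_weight goods k) := by unfold Pre_get_min_weight; infer_instance
def pvWitness_get_min_weight : List Int × Int := ([3, 1, 2], 2)

def Spec_get_min_weight (goods : List Int) (k : Int) (out : Int) : Prop := out = get_min_weight_alt goods k
instance (goods : List Int) (k : Int) (out : Int) : Decidable (Spec_get_min_weight goods k out) := by unfold Spec_get_min_weight; infer_instance

-- ===== CLAIM (what is proved, stated in full; the proofs are below) =====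
def Claim_equal_get_min_weight : Prop := ∀ (goods : List Int) (k : Int), Dom_get_min_weight goods k → Pre_get_min_weight goods k → Spec_get_min_weight goods k (get_min_weight goods k)

-- ===== LEMMAS AND PROOFS =====

-- a packing run: each good is placed on some van whose load stays ≤ w
inductive CanPack (w : Int) : List Int → List Int → Prop
  | nil (vans : List Int) : CanPack w vans []
  | step {vans : List Int} {g : Int} {items : List Int} (i : Nat)
      (hi : i < vans.length) (hle : vans.getD i 0 + g ≤ w)
      (h : CanPack w (vans.set i (vans.getD i 0 + g)) items) :
      CanPack w vans (g :: items)

inductive Interleave : List Int → List Int → List Int → Prop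
  | nil : Interleave [] [] []
  | left {s r t : List Int} {g : Int} : Interleave s r t → Interleave (g :: s) r (g :: t)
  | right {s r t : List Int} {g : Int} : Interleave s r t → Interleave s (g :: r) (g :: t)

def PrefOK (w : Int) : Int → List Int → Prop
  | _, [] => True
  | load, g :: s => load + g ≤ w ∧ PrefOK w (load + g) s

theorem canPack_cons_iff (w : Int) (vans : List Int) (g : Int) (items : List Int) :
    CanPack w vans (g :: items) ↔
      ∃ i, i < vans.length ∧ vans.getD i 0 + g ≤ w ∧
        CanPack w (vans.set i (vans.getD i 0 + g)) items := by
  constructor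
  · rintro (_ | ⟨i, hi, hle, h⟩)
    exact ⟨i, hi, hle, h⟩
  · rintro ⟨i, hi, hle, h⟩
    exact CanPack.step i hi hle h

theorem canPack_nil_vans (w : Int) (items : List Int) :
    CanPack w [] items ↔ items = [] := by
  constructor
  · rintro (_ | ⟨i, hi, hle, h⟩)
    · rfl
    · simp at hi
  · rintro rfl
    exact CanPack.nil _

-- A's inner for-loop: checkTryA searches for a van index j ≥ i that works
theorem checkTryA_iff (w g : Int) (rest : List Int) :
    ∀ (fuel : Nat) (vans : List Int) (i : Nat), vans.length - i ≤ fuel →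
      (checkTryA w vans g rest i = true ↔
        ∃ j, i ≤ j ∧ j < vans.length ∧ vans.getD j 0 + g ≤ w ∧
          checkA w (vans.set j (vans.getD j 0 + g)) rest = true) := by
  intro fuel
  induction fuel with
  | zero =>
    intro vans i hf
    have hiv : ¬ i < vans.length := by omega
    constructor
    · intro h
      rw [checkTryA] at h
      simp [hiv] at h
    · rintro ⟨j, hij, hjv, -, -⟩
      omega
  | succ m ihm =>
    intro vans i hf
    by_cases hiv : i < vans.length
    · rw [checkTryA]
      have ih' := ihm vans (i + 1) (by omega)
      by_cases hc : vans.getD i 0 + g ≤ w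
      · by_cases hk : checkA w (vans.set i (vans.getD i 0 + g)) rest = true
        · simp only [hiv, hc, hk, dif_pos, if_pos, if_true]
          constructor
          · intro _
            exact ⟨i, le_refl i, hiv, hc, hk⟩
          · intro _
            trivial
        · have hk' : checkA w (vans.set i (vans.getD i 0 + g)) rest = false := by
            revert hk; cases checkA w (vans.set i (vans.getD i 0 + g)) rest <;> simp
          simp only [hiv, hc, hk', dif_pos, if_pos, if_true, Bool.false_eq_true, if_false]
          rw [ih']
          constructor
          · rintro ⟨j, h1, h2, h3, h4⟩
            exact ⟨j, by omega, h2, h3, h4⟩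
          · rintro ⟨j, h1, h2, h3, h4⟩
            rcases Nat.eq_or_lt_of_le h1 with heq | hlt
            · subst heq
              rw [h4] at hk'
              cases hk'
            · exact ⟨j, by omega, h2, h3, h4⟩
      · simp only [hiv, hc, dif_pos, if_neg, if_false]
        rw [ih']
        constructor
        · rintro ⟨j, h1, h2, h3, h4⟩
          exact ⟨j, by omega, h2, h3, h4⟩
        · rintro ⟨j, h1, h2, h3, h4⟩
          rcases Nat.eq_or_lt_of_le h1 with heq | hlt
          · subst heq
            exact absurd h3 hc
          · exact ⟨j, by omega, h2, h3, h4⟩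
    · constructor
      · intro h
        rw [checkTryA] at h
        simp [hiv] at h
      · rintro ⟨j, hij, hjv, -, -⟩
        omega

-- checkA decides CanPack
theorem checkA_iff (w : Int) :
    ∀ (items vans : List Int), checkA w vans items = true ↔ CanPack w vans items := by
  intro items
  induction items with
  | nil =>
    intro vans
    rw [checkA]
    constructor
    · intro _
      exact CanPack.nil _
    · intro _
      rfl
  | cons g rest ihr =>
    intro vans
    rw [checkA]
    rw [checkTryA_iff w g rest vans.length vans 0 (by omega)]
    rw [canPack_cons_iff]
    constructor
    · rintro ⟨j, -, hjv, hle, hk⟩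
      exact ⟨j, hjv, hle, (ihr _).mp hk⟩
    · rintro ⟨i, hiv, hle, hcp⟩
      exact ⟨i, Nat.zero_le _, hiv, hle, (ihr _).mpr hcp⟩

-- the split lemma: the head van is independent of the remaining vans
theorem canPack_cons_split (w : Int) :
    ∀ (items : List Int) (l0 : Int) (ls : List Int),
      CanPack w (l0 :: ls) items ↔
        ∃ s r, Interleave s r items ∧ PrefOK w l0 s ∧ CanPack w ls r := by
  intro items
  induction items with
  | nil =>
    intro l0 ls
    constructor
    · intro _
      exact ⟨[], [], .nil, trivial, CanPack.nil _⟩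
    · rintro ⟨s, r, hint, -, -⟩
      cases hint
      exact CanPack.nil _
  | cons g t iht =>
    intro l0 ls
    rw [canPack_cons_iff]
    constructor
    · rintro ⟨i, hiv, hle, hcp⟩
      cases i with
      | zero =>
        simp only [List.getD_cons_zero] at hle
        simp only [List.getD_cons_zero, List.set_cons_zero] at hcp
        obtain ⟨s, r, hint, hpok, hcp'⟩ := (iht (l0 + g) ls).mp hcp
        exact ⟨g :: s, r, .left hint, ⟨hle, hpok⟩, hcp'⟩
      | succ j =>
        simp only [List.length_cons, Nat.succ_lt_succ_iff] at hiv
        simp only [List.getD_cons_succ] at hle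
        simp only [List.getD_cons_succ, List.set_cons_succ] at hcp
        obtain ⟨s, r, hint, hpok, hcp'⟩ := (iht l0 _).mp hcp
        exact ⟨s, g :: r, .right hint, hpok, CanPack.step j hiv hle hcp'⟩
    · rintro ⟨s, r, hint, hpok, hcp⟩
      cases hint with
      | left hint' =>
        obtain ⟨hle, hpok'⟩ := hpok
        refine ⟨0, by simp, by simpa using hle, ?_⟩
        simp only [List.getD_cons_zero, List.set_cons_zero]
        exact (iht (l0 + g) ls).mpr ⟨_, _, hint', hpok', hcp⟩
      | right hint' =>
        obtain ⟨j, hjv, hle, hcp'⟩ := (canPack_cons_iff w ls g _).mp hcp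
        refine ⟨j + 1, by simpa using hjv, by simpa using hle, ?_⟩
        simp only [List.getD_cons_succ, List.set_cons_succ]
        exact (iht l0 (ls.set j _)).mpr ⟨_, _, hint', hpok, hcp'⟩

theorem firstVanB_iff (w : Int) (left : Int) :
    ∀ (items : List Int) (load : Int) (rest : List Int),
      firstVanB items load rest w left = true ↔
        ∃ s r, Interleave s r items ∧ PrefOK w load s ∧ feasB (rest ++ r) w left = true := by
  intro items
  induction items with
  | nil =>
    intro load rest
    rw [firstVanB]
    constructor
    · intro h
      exact ⟨[], [], .nil, trivial, by simpa using h⟩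
    · rintro ⟨s, r, hint, -, h⟩
      cases hint
      simpa using h
  | cons g tail iht =>
    intro load rest
    rw [firstVanB]
    have hsplit : (if (decide (load + g ≤ w) && firstVanB tail (load + g) rest w left) then true
        else firstVanB tail load (rest ++ [g]) w left) = true ↔
        ((load + g ≤ w ∧ firstVanB tail (load + g) rest w left = true) ∨
          firstVanB tail load (rest ++ [g]) w left = true) := by
      cases hfv : firstVanB tail (load + g) rest w left <;> by_cases hw : load + g ≤ w <;>
        simp [hfv, hw]
    rw [hsplit]
    constructor
    · rintro (⟨hle, h1⟩ | h2)
      · obtain ⟨s, r, hint, hpok, hf⟩ := (iht (load + g) rest).mp h1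
        exact ⟨g :: s, r, .left hint, ⟨hle, hpok⟩, hf⟩
      · obtain ⟨s, r, hint, hpok, hf⟩ := (iht load (rest ++ [g])).mp h2
        refine ⟨s, g :: r, .right hint, hpok, ?_⟩
        rw [List.append_cons]
        exact hf
    · rintro ⟨s, r, hint, hpok, hf⟩
      cases hint with
      | left hint' =>
        obtain ⟨hle, hpok'⟩ := hpok
        exact Or.inl ⟨hle, (iht (load + g) rest).mpr ⟨_, _, hint', hpok', hf⟩⟩
      | right hint' =>
        refine Or.inr ((iht load (rest ++ [g])).mpr ⟨_, _, hint', hpok, ?_⟩)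
        rw [← List.append_cons]
        exact hf

theorem feasB_iff (w : Int) :
    ∀ (n : Nat) (k : Int), k.toNat = n →
      ∀ items, feasB items w k = true ↔ CanPack w (List.replicate n 0) items := by
  intro n
  induction n with
  | zero =>
    intro k hk items
    have hk0 : k ≤ 0 := by omega
    cases items with
    | nil =>
      constructor
      · intro _
        exact CanPack.nil _
      · intro _
        simp [feasB]
    | cons g t =>
      rw [feasB]
      rw [if_neg (by simp : ¬ ((g :: t : List Int).isEmpty = true))]
      rw [dif_pos hk0]
      rw [List.replicate_zero, canPack_nil_vans]
      simp
  | succ m ihm =>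
    intro k hk items
    have hk1 : ¬ k ≤ 0 := by omega
    cases items with
    | nil =>
      constructor
      · intro _
        exact CanPack.nil _
      · intro _
        simp [feasB]
    | cons g t =>
      rw [feasB]
      rw [if_neg (by simp : ¬ ((g :: t : List Int).isEmpty = true))]
      rw [dif_neg hk1]
      rw [firstVanB_iff]
      rw [List.replicate_succ, canPack_cons_split]
      constructor
      · rintro ⟨s, r, hint, hpok, hf⟩
        refine ⟨s, r, hint, hpok, ?_⟩
        rw [← ihm (k - 1) (by omega) r]
        simpa using hf
      · rintro ⟨s, r, hint, hpok, hcp⟩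
        refine ⟨s, r, hint, hpok, ?_⟩
        rw [← ihm (k - 1) (by omega) r] at hcp
        simpa using hcp

theorem checks_agree (w : Int) (goods : List Int) (k : Int) :
    checkA w (List.replicate k.toNat 0) goods = feasB goods w k := by
  rw [Bool.eq_iff_iff]
  rw [checkA_iff w goods (List.replicate k.toNat 0)]
  rw [feasB_iff w k.toNat k rfl goods]

theorem search_agree (goods : List Int) (k : Int) :
    ∀ (n : Nat) (lo hi : Int), (hi - lo).toNat ≤ n →
      bsA goods k lo hi = searchB goods k lo hi := by
  intro n
  induction n with
  | zero =>
    intro lo hi h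
    have hge : lo ≥ hi := by omega
    rw [bsA, searchB]
    rw [dif_neg (by omega : ¬ lo < hi), dif_pos hge]
  | succ m ihm =>
    intro lo hi h
    by_cases hlt : lo < hi
    · obtain ⟨h1, h2⟩ := PySem.Int.floordiv_two_mid_bounds (lo := lo) (hi := hi) (le_of_lt hlt)
      have h3 : PySem.Int.floordiv (lo + hi) 2 < hi :=
        (PySem.Int.floordiv_lt_iff_lt_mul (by omega)).mpr (by omega)
      rw [bsA, searchB]
      rw [dif_pos hlt, dif_neg (by omega : ¬ lo ≥ hi)]
      simp only [checks_agree]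
      by_cases hc : feasB goods (PySem.Int.floordiv (lo + hi) 2) k = true
      · rw [if_pos hc, if_pos hc]
        exact ihm lo _ (by omega)
      · rw [if_neg hc, if_neg hc]
        exact ihm _ hi (by omega)
    · rw [bsA, searchB]
      rw [dif_neg hlt, dif_pos (by omega : lo ≥ hi)]

-- ===== VERDICT (by name: the statement is the Claim_ definition above) =====
theorem get_min_weight_spec : Claim_equal_get_min_weight := by
  intro goods k _ _
  unfold Spec_get_min_weight get_min_weight get_min_weight_alt
  exact search_agree goods k ((goods.sum - (PySem.List.max? goods (fun x => x)).getD 0).toNat) _ _ (le_refl _)
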